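-- pv_equiv track=rewrite | github.com/ldupleich/LeticiaDupleichProjects | Servers/httpserver.py | cookie_count
-- ===== SOURCE A (Python) =====
-- def cookie_count(request_text):
--     """
--     This method returns the number of pages that a client has been to.
--     It does this by extracting the page-count value from the client's
--     request.
--     """
--     for line in request_text.splitlines():
--         if line.startswith('Cookie:'):
--             cookies = line[len('Cookie:'):].strip().split(';')
--             for cookie in cookies:
--                 k, _, v = cookie.strip().partition('=')
--                 if k == "page-counter":
--                     return v
--     return None
-- ===== SOURCE B (Python) =====
-- def cookie_count(request_text):
--     """Build a cookie table in one pass (first occurrence wins via setdefault),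
--     then look up 'page-counter' once."""
--     cookies = {}
--     for line in request_text.splitlines():
--         if line.startswith('Cookie:'):
--             for part in line[len('Cookie:'):].strip().split(';'):
--                 k, _, v = part.strip().partition('=')
--                 cookies.setdefault(k, v)
--     return cookies.get('page-counter')
-- ===== Notes on version B (the rewrite author's own statement) =====
-- stated objective: idiomatic
-- what changed: Replaces the nested scan-with-early-return by a single pass that builds a cookie dict (setdefault, first occurrence wins) followed by one .get('page-counter') lookup.
import Mathlib
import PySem

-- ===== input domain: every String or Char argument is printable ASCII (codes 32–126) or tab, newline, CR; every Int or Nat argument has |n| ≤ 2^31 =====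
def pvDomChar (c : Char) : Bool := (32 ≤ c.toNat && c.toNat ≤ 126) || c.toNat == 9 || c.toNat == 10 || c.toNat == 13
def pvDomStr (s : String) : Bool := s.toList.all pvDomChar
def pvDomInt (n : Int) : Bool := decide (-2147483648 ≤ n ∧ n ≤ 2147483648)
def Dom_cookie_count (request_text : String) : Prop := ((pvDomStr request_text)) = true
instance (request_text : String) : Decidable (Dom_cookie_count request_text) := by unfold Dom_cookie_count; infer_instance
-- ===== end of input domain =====

-- B builds a cookie dict in one pass (setdefault: first occurrence wins) and looks up 'page-counter' once,
-- instead of A's scan with early return; same cost, more idiomatic.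

-- shared primitive: s.partition('=') restricted to the two used components (k, v) — exact:
-- splits at the FIRST '='; if absent, (s, "")
def pyPartEq (s : String) : String × String :=
  let cs := s.toList
  let i := PySem.Chars.find cs ['=']
  if i < 0 then (s, "")
  else (String.ofList (cs.take i.toNat), String.ofList (cs.drop (i.toNat + 1)))

-- ===== PORT A =====
def cookieScan (cookies : List String) : Option String :=
  match cookies with
  | [] => none
  | c :: rest =>
    let kv := pyPartEq (PySem.Str.strip c)
    if kv.1 = "page-counter" then some kv.2 else cookieScan rest

def lineScan (lines : List String) : Option String :=
  match lines with
  | [] => none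
  | line :: rest =>
    if PySem.Str.startswith line "Cookie:" then
      let cookies := (PySem.Str.split? (PySem.Str.strip (PySem.Str.slice line (some 7) none)) ";").getD []
      match cookieScan cookies with
      | some v => some v
      | none => lineScan rest
    else lineScan rest

def cookie_count (request_text : String) : Option String :=
  lineScan (PySem.Str.splitlines request_text)

-- ===== PORT B =====
def addCookies (d : PySem.Dict String String) (parts : List String) : PySem.Dict String String :=
  parts.foldl (fun d part =>
    let kv := pyPartEq (PySem.Str.strip part)
    d.setdefault kv.1 kv.2) d

def buildCookies (lines : List String) : PySem.Dict String String :=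
  lines.foldl (fun d line =>
    if PySem.Str.startswith line "Cookie:" then
      addCookies d ((PySem.Str.split? (PySem.Str.strip (PySem.Str.slice line (some 7) none)) ";").getD [])
    else d) PySem.Dict.empty

def cookie_count_alt (request_text : String) : Option String :=
  (buildCookies (PySem.Str.splitlines request_text)).get? "page-counter"

-- ===== PRECONDITION & SPEC =====
def Spec_cookie_count (request_text : String) (out : Option String) : Prop := out = cookie_count_alt request_text
instance (request_text : String) (out : Option String) : Decidable (Spec_cookie_count request_text out) := by unfold Spec_cookie_count; infer_instance

-- ===== CLAIM (what is proved, stated in full; the proofs are below) =====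
def Claim_equal_cookie_count : Prop := ∀ (request_text : String), Dom_cookie_count request_text → Spec_cookie_count request_text (cookie_count request_text)

-- ===== LEMMAS AND PROOFS =====

-- setdefault-fold over one line's cookie parts: first match wins, earlier dict entries win over the line
theorem addCookies_get (parts : List String) (d : PySem.Dict String String) :
    (addCookies d parts).get? "page-counter" =
      (d.get? "page-counter").or (cookieScan parts) := by
  induction parts generalizing d with
  | nil => simp [addCookies, cookieScan]
  | cons c rest ih =>
    have step : addCookies d (c :: rest) =
        addCookies (d.setdefault (pyPartEq (PySem.Str.strip c)).1 (pyPartEq (PySem.Str.strip c)).2) rest := rfl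
    rw [step, ih]
    by_cases hk : (pyPartEq (PySem.Str.strip c)).1 = "page-counter"
    · rw [hk, PySem.Dict.get?_setdefault_self]
      simp only [cookieScan, hk]
      cases d.get? "page-counter" <;> simp
    · rw [PySem.Dict.get?_setdefault_of_ne _ _ (fun h => hk h.symm)]
      simp [cookieScan, hk]

theorem buildCookies_get (lines : List String) (d : PySem.Dict String String) :
    (lines.foldl (fun d line =>
      if PySem.Str.startswith line "Cookie:" then
        addCookies d ((PySem.Str.split? (PySem.Str.strip (PySem.Str.slice line (some 7) none)) ";").getD [])
      else d) d).get? "page-counter" =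
      (d.get? "page-counter").or (lineScan lines) := by
  induction lines generalizing d with
  | nil => simp [lineScan]
  | cons line rest ih =>
    simp only [List.foldl_cons]
    rw [ih]
    by_cases hs : PySem.Str.startswith line "Cookie:" = true
    · simp only [hs, if_true]
      rw [addCookies_get]
      simp only [lineScan, hs, if_true]
      cases h : cookieScan ((PySem.Str.split? (PySem.Str.strip (PySem.Str.slice line (some 7) none)) ";").getD []) <;>
        cases d.get? "page-counter" <;> simp
    · simp only [lineScan]
      simp [Bool.not_eq_true] at hs
      simp [hs]

-- ===== VERDICT (by name: the statement is the Claim_ definition above) =====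
theorem cookie_count_spec : Claim_equal_cookie_count := by
  intro rt _
  unfold Spec_cookie_count cookie_count cookie_count_alt buildCookies
  rw [buildCookies_get]
  simp [PySem.Dict.empty, PySem.Dict.get?]
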